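-- pv_equiv track=rewrite | github.com/raalesir/sim | sim/aux.py | generate_x_rotation_seq
-- ===== SOURCE A (Python) =====
-- def generate_x_rotation_seq(N):
--     """
--         returns a sequence of multiples of 90 degrees  rotation around x-axis for a conformation \
--         generated by ``make_circular_chain``. For example for ``N=12`` the output is ``[1, 1, 2, 1]``
--
--     :param N: number  of beads
--     :type N: int
--     :return: ``[1,1,2,1,2,1,2,2,...]``
--     :rtype: list
--     """
--
--     n_2 = 1
--     n = 0
--     seq = [[1]]
--
--     while n < N / 2 - 2:
--         t1 = [1] + n_2 * [2] + [1]
--         t2 = t1[1:-1]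
--         n_2 += 1
--         n = n + len(t1) + len(t2)
--         seq.append(t1 + t2)
--
--     return [item for sublist in seq for item in sublist][:int(N / 2 - 2)]
-- ===== SOURCE B (Python) =====
-- def generate_x_rotation_seq(N):
--     # Fill [2]*M and mark the 1-positions by closed-form index instead of
--     # building and flattening nested blocks.
--     M = (N - 4) // 2
--     if M <= 0:
--         return []
--     res = [2] * M
--     res[0] = 1
--     k = 1
--     while True:
--         s = 1 + (k - 1) * (k + 2)
--         if s >= M:
--             break
--         res[s] = 1
--         if s + k + 1 < M:
--             res[s + k + 1] = 1
--         k += 1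
--     return res
-- ===== Notes on version B (the rewrite author's own statement) =====
-- stated objective: alternative
-- what changed: Instead of A's while-loop that builds nested blocks [1]+k*[2]+[1] plus their trimmed copies, flattens the list of lists and slices it, B allocates [2]*M once and writes the 1s directly at their closed-form positions 1+(k-1)*(k+2) and 1+(k-1)*(k+2)+k+1.
import Mathlib
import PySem

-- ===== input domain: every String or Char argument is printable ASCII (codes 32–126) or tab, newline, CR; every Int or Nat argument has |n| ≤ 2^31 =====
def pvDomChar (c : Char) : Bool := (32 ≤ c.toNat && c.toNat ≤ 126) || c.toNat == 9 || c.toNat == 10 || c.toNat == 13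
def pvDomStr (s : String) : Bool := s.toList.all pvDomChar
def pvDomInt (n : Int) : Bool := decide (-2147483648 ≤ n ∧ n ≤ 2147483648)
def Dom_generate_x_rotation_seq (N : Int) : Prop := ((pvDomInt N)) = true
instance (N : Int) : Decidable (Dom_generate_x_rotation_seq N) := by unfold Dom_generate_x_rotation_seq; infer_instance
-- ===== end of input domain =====

-- B fills a [2]*M array and marks the 1-positions by closed-form index, instead of
-- A's building and flattening nested blocks then slicing (objective: simpler/alternative).


-- ===== PORT A =====
-- `while n < N / 2 - 2` on Python floats: since n is an integer and |N| ≤ 2^31,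
-- N/2 is exact in double precision, so the guard is exactly `2 * n < N - 4`.
-- fuel only makes the recursion structural: n grows by ≥ 4 per iteration, so
-- N.toNat + 1 iterations are provably never exhausted (see xrotLoop_flatten)
def xrotLoop (N : Int) (fuel : Nat) (n2 n : Int) (seq : List (List Int)) : List (List Int) :=
  match fuel with
  | 0 => seq
  | f + 1 =>
    if 2 * n < N - 4 then
      let t1 : List Int := [1] ++ PySem.List.pyRepeat [2] n2 ++ [1]   -- [1] + n_2*[2] + [1]
      let t2 : List Int := PySem.List.slice t1 (some 1) (some (-1))   -- t1[1:-1]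
      xrotLoop N f (n2 + 1) (n + PySem.List.len t1 + PySem.List.len t2) (seq ++ [t1 ++ t2])
    else seq

-- `int(N / 2 - 2)` on floats is exactly trunc((N-4)/2) for |N| ≤ 2^31.
def generate_x_rotation_seq (N : Int) : List Int :=
  let seq := xrotLoop N (N.toNat + 1) 1 0 [[1]]
  PySem.List.slice seq.flatten none (some (PySem.Int.truncdiv (N - 4) 2))

-- ===== PORT B =====
-- fuel only makes the recursion structural: the loop breaks before k reaches M,
-- so M iterations are provably never exhausted (see xrotFill_spec)
def xrotFill (M fuel k : Nat) (res : List Int) : List Int :=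
  match fuel with
  | 0 => res
  | f + 1 =>
    let s := 1 + (k - 1) * (k + 2)
    if s < M then
      let r1 := res.set s 1
      let r2 := if s + k + 1 < M then r1.set (s + k + 1) 1 else r1
      xrotFill M f (k + 1) r2
    else res

def generate_x_rotation_seq_alt (N : Int) : List Int :=
  let M := PySem.Int.floordiv (N - 4) 2
  if M ≤ 0 then []
  else xrotFill M.toNat M.toNat 1 ((List.replicate M.toNat 2).set 0 1)

-- ===== PRECONDITION & SPEC =====
def Spec_generate_x_rotation_seq (N : Int) (out : List Int) : Prop := out = generate_x_rotation_seq_alt N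
instance (N : Int) (out : List Int) : Decidable (Spec_generate_x_rotation_seq N out) := by unfold Spec_generate_x_rotation_seq; infer_instance

-- ===== CLAIM (what is proved, stated in full; the proofs are below) =====
def Claim_equal_generate_x_rotation_seq : Prop := ∀ (N : Int), Dom_generate_x_rotation_seq N → Spec_generate_x_rotation_seq N (generate_x_rotation_seq N)

-- ===== LEMMAS AND PROOFS =====

-- the canonical pattern: block k and the flattened sequence after k blocks
def xblock (k : Nat) : List Int := 1 :: (List.replicate k 2 ++ 1 :: List.replicate k 2)
def xpat (k : Nat) : List Int := 1 :: ((List.range' 1 k).map xblock).flatten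

theorem xblock_length (k : Nat) : (xblock k).length = 2 * k + 2 := by
  simp [xblock]; omega

theorem xpat_succ (k : Nat) : xpat (k + 1) = xpat k ++ xblock (k + 1) := by
  simp [xpat, List.range'_concat, Nat.add_comm 1 k]

theorem xpat_length (k : Nat) : (xpat k).length = 1 + k * (k + 3) := by
  induction k with
  | zero => simp [xpat]
  | succ m ih =>
    rw [xpat_succ, List.length_append, ih, xblock_length]
    ring

theorem xpat_prefix {j k : Nat} (h : j ≤ k) : xpat j <+: xpat k := by
  induction k with
  | zero => simp [Nat.le_zero.mp h]
  | succ m ih =>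
    rcases Nat.lt_or_ge j (m + 1) with hlt | hge
    · exact (ih (by omega)).trans ⟨xblock (m + 1), (xpat_succ m).symm⟩
    · have : j = m + 1 := by omega
      simp [this]

theorem xpat_take_eq {j k M : Nat} (hj : M ≤ (xpat j).length) (hk : M ≤ (xpat k).length) :
    (xpat j).take M = (xpat k).take M := by
  rcases Nat.le_total j k with h | h
  · obtain ⟨t, ht⟩ := xpat_prefix h
    rw [← ht, List.take_append_of_le_length hj]
  · obtain ⟨t, ht⟩ := xpat_prefix h
    rw [← ht, List.take_append_of_le_length hk]



theorem set_replicate_two (n i : Nat) (h : i < n) :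
    (List.replicate n (2 : Int)).set i 1 =
      List.replicate i 2 ++ 1 :: List.replicate (n - i - 1) 2 := by
  have hsplit : List.replicate n (2 : Int)
      = List.replicate i 2 ++ 2 :: List.replicate (n - i - 1) 2 := by
    rw [← List.replicate_succ, ← List.replicate_add]
    congr 1
    omega
  rw [hsplit, List.set_append_right i 1 (by simp)]
  simp

-- B's loop invariant: res is the first M cells of the pattern up to block j, padded with 2s
theorem xrotFill_spec (d : Nat) : ∀ (j M : Nat) (res : List Int), M ≤ j + 1 + d →
    res = (xpat j).take M ++ List.replicate (M - (xpat j).length) 2 →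
    xrotFill M d (j + 1) res = (xpat M).take M := by
  induction d with
  | zero =>
    intro j M res hd hres
    have hlen : M ≤ (xpat j).length := by
      rw [xpat_length]
      have := Nat.le_mul_of_pos_right j (show 0 < j + 3 by omega)
      omega
    rw [xrotFill]
    have hz : M - (xpat j).length = 0 := by omega
    rw [hres, hz, List.replicate_zero, List.append_nil]
    exact xpat_take_eq hlen (by
      rw [xpat_length]
      have := Nat.le_mul_of_pos_right M (show 0 < M + 3 by omega)
      omega)
  | succ e ih =>
    intro j M res hd hres
    have hLval : (xpat j).length = 1 + j * (j + 3) := xpat_length j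
    have ea : j + 1 - 1 = j := rfl
    have eb : j + 1 + 2 = j + 3 := rfl
    by_cases hs : 1 + (j + 1 - 1) * (j + 1 + 2) < M
    · have hsL : 1 + (j + 1 - 1) * (j + 1 + 2) = (xpat j).length := by
        rw [ea, eb, hLval]
      have hLM : (xpat j).length < M := by rw [← hsL]; exact hs
      obtain ⟨m, hm⟩ : ∃ m, M = (xpat j).length + m + 1 := ⟨M - (xpat j).length - 1, by omega⟩
      rw [xrotFill]
      simp only [if_pos hs]
      apply ih (j + 1) M _ (by omega)
      have hres' : res = xpat j ++ 2 :: List.replicate m 2 := by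
        rw [hres, List.take_of_length_le (by omega)]
        have hq : M - (xpat j).length = m + 1 := by omega
        rw [hq, List.replicate_succ]
      have hr1 : res.set (1 + (j + 1 - 1) * (j + 1 + 2)) 1
          = xpat j ++ 1 :: List.replicate m 2 := by
        rw [hres', hsL, List.set_append_right _ 1 (le_refl _), Nat.sub_self, List.set_cons_zero]
      have hlen1 : (xpat (j + 1)).length = (xpat j).length + (2 * (j + 1) + 2) := by
        rw [xpat_succ, List.length_append, xblock_length]
      have hM' : M - (xpat j).length = m + 1 := by omega
      by_cases hs2 : 1 + (j + 1 - 1) * (j + 1 + 2) + (j + 1) + 1 < M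
      · simp only [if_pos hs2, hr1]
        have hjm : j + 2 < m + 1 := by
          have := hs2; rw [hsL] at this; omega
        have hset2 : (xpat j ++ 1 :: List.replicate m 2).set ((xpat j).length + (j + 2)) 1
            = xpat j ++ 1 :: (List.replicate (j + 1) 2 ++ 1 :: List.replicate (m - j - 2) 2) := by
          rw [List.set_append_right _ 1 (by omega), Nat.add_sub_cancel_left,
            List.set_cons_succ, set_replicate_two m (j + 1) (by omega)]
          have hq : m - (j + 1) - 1 = m - j - 2 := by omega
          rw [hq]
        have harg : 1 + (j + 1 - 1) * (j + 1 + 2) + (j + 1) + 1 = (xpat j).length + (j + 2) := by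
          rw [hsL]; omega
        rw [harg, hset2]
        rcases Nat.lt_or_ge M (xpat (j + 1)).length with hMlt | hMge
        · have hz : M - (xpat (j + 1)).length = 0 := by omega
          have hm2 : m + 1 < 2 * (j + 1) + 2 := by omega
          rw [hz, List.replicate_zero, List.append_nil, xpat_succ, List.take_append,
            List.take_of_length_le (by omega), hM', xblock, List.take_succ_cons,
            List.take_append, List.take_replicate]
          simp only [List.length_replicate]
          have h1 : min m (j + 1) = j + 1 := by omega
          have h2 : m - (j + 1) = (m - j - 2) + 1 := by omega
          rw [h1, h2, List.take_succ_cons, List.take_replicate]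
          have h3 : min (m - j - 2) (j + 1) = m - j - 2 := by omega
          rw [h3]
        · rw [List.take_of_length_le hMge]
          have hrep : M - (xpat (j + 1)).length = m - j - 2 - (j + 1) := by omega
          rw [hrep, xpat_succ, List.append_assoc, xblock]
          congr 2
          have hsplit : List.replicate (m - j - 2) (2 : Int)
              = List.replicate (j + 1) 2 ++ List.replicate (m - j - 2 - (j + 1)) 2 := by
            rw [← List.replicate_add]; congr 1; omega
          simp [hsplit]
      · simp only [if_neg hs2, hr1]
        have hMle : M ≤ (xpat j).length + (j + 2) := by
          have := hs2; rw [hsL] at this; omega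
        have hMlt : M < (xpat (j + 1)).length := by omega
        have hz : M - (xpat (j + 1)).length = 0 := by omega
        rw [hz, List.replicate_zero, List.append_nil, xpat_succ, List.take_append,
          List.take_of_length_le (by omega), hM', xblock, List.take_succ_cons,
          List.take_append, List.take_replicate]
        simp only [List.length_replicate]
        have h1 : min m (j + 1) = m := by omega
        have h2 : m - (j + 1) = 0 := by omega
        rw [h1, h2, List.take_zero]
        simp
    · rw [xrotFill]
      simp only [if_neg hs]
      have hML : M ≤ (xpat j).length := by
        rw [hLval]
        rw [ea, eb] at hs
        omega
      have hz : M - (xpat j).length = 0 := by omega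
      rw [hres, hz, List.replicate_zero, List.append_nil]
      exact xpat_take_eq hML (by
        rw [xpat_length]
        have := Nat.le_mul_of_pos_right M (show 0 < M + 3 by omega)
        omega)

-- A's loop: starting after block j (n2 = j+1, n = j*(j+3) = flattened length so far minus 1),
-- the flattened seq on exit is some xpat K whose stop condition holds
theorem xrotLoop_flatten (N : Int) (d : Nat) : ∀ (j : Nat) (seq : List (List Int)),
    (N - 4 - 2 * ((j : Int) * ((j : Int) + 3))).toNat ≤ 4 * d →
    seq.flatten = xpat j →
    ∃ K : Nat, (xrotLoop N d ((j : Int) + 1) ((j : Int) * ((j : Int) + 3)) seq).flatten = xpat K ∧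
      ¬ (2 * ((K : Int) * ((K : Int) + 3)) < N - 4) := by
  induction d with
  | zero =>
    intro j seq hd hseq
    have hg : ¬ (2 * ((j : Int) * ((j : Int) + 3)) < N - 4) := by omega
    exact ⟨j, by rw [xrotLoop]; exact hseq, hg⟩
  | succ f ih =>
    intro j seq hd hseq
    by_cases hg : 2 * ((j : Int) * ((j : Int) + 3)) < N - 4
    · rw [xrotLoop]
      simp only [if_pos hg]
      have ht1 : [1] ++ PySem.List.pyRepeat [2] ((j : Int) + 1) ++ [1]
          = 1 :: (List.replicate (j + 1) (2 : Int) ++ [1]) := by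
        rw [PySem.List.pyRepeat_singleton]
        have hn : ((j : Int) + 1).toNat = j + 1 := by omega
        rw [hn]
        simp
      have ht2 : PySem.List.slice (1 :: (List.replicate (j + 1) (2 : Int) ++ [1]))
            (some 1) (some (-1)) = List.replicate (j + 1) (2 : Int) := by
        simp [PySem.List.slice, PySem.List.clampIdx]
        rw [if_neg (by omega : ¬ ((j : Int) + 1 + 1 < 0))]
        have hx : ((j : Int) + 1 + 1).toNat = j + 2 := by omega
        rw [hx]
        have hy : j + 2 - 1 = j + 1 := by omega
        rw [hy]
        simp
      rw [ht1, ht2]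
      have hblk : (1 :: (List.replicate (j + 1) (2 : Int) ++ [1])) ++ List.replicate (j + 1) 2
          = xblock (j + 1) := by
        simp [xblock]
      have hlen : PySem.List.len (1 :: (List.replicate (j + 1) (2 : Int) ++ [1]))
          = (j : Int) + 3 := by
        simp [PySem.List.len_eq]
        omega
      have hlen2 : PySem.List.len (List.replicate (j + 1) (2 : Int)) = (j : Int) + 1 := by
        simp [PySem.List.len_eq]
      rw [hlen, hlen2]
      have e2 : (j : Int) + 1 + 1 = ((j + 1 : Nat) : Int) + 1 := by push_cast; ring
      have e3 : (j : Int) * ((j : Int) + 3) + ((j : Int) + 3) + ((j : Int) + 1)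
          = ((j + 1 : Nat) : Int) * (((j + 1 : Nat) : Int) + 3) := by push_cast; ring
      rw [e2, e3, hblk]
      have e4 : ((j + 1 : Nat) : Int) * (((j + 1 : Nat) : Int) + 3)
          = (j : Int) * ((j : Int) + 3) + 2 * (j : Int) + 4 := by push_cast; ring
      exact ih (j + 1) (seq ++ [xblock (j + 1)])
        (by omega) (by simp [List.flatten_append, hseq, xpat_succ])
    · refine ⟨j, ?_, hg⟩
      rw [xrotLoop]
      simp only [if_neg hg]
      exact hseq

theorem tdiv_eq_floordiv_of_nonneg {a : Int} (h : 0 ≤ a) :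
    PySem.Int.truncdiv a 2 = PySem.Int.floordiv a 2 := by
  rw [PySem.Int.floordiv_eq_ediv_of_pos (by norm_num)]
  exact Int.tdiv_eq_ediv_of_nonneg h

-- ===== VERDICT (by name: the statement is the Claim_ definition above) =====
theorem generate_x_rotation_seq_spec : Claim_equal_generate_x_rotation_seq := by
  intro N _
  unfold Spec_generate_x_rotation_seq generate_x_rotation_seq generate_x_rotation_seq_alt
  dsimp only
  by_cases h6 : N ≤ 3
  · -- the loop never runs; both sides are []
    rw [xrotLoop]
    simp only [if_neg (by omega : ¬ (2 * (0:Int) < N - 4))]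
    have hT : PySem.Int.truncdiv (N - 4) 2 ≤ 0 := by
      simp only [PySem.Int.truncdiv]
      rw [Int.tdiv_eq_ediv]
      have hsg : Int.sign 2 = 1 := rfl
      rw [hsg]
      split_ifs <;> omega
    have hb : PySem.List.clampIdx 1 (PySem.Int.truncdiv (N - 4) 2) = 0 := by
      simp only [PySem.List.clampIdx]
      split_ifs <;> omega
    have hM : PySem.Int.floordiv (N - 4) 2 ≤ 0 := by
      rw [PySem.Int.floordiv_eq_ediv_of_pos (by norm_num)]
      omega
    rw [if_pos hM]
    simp [PySem.List.slice, hb]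
  · push_neg at h6
    have h4 : (0:Int) ≤ N - 4 := by omega
    have hTM : PySem.Int.truncdiv (N - 4) 2 = PySem.Int.floordiv (N - 4) 2 :=
      tdiv_eq_floordiv_of_nonneg h4
    have hMed : PySem.Int.floordiv (N - 4) 2 = (N - 4) / 2 :=
      PySem.Int.floordiv_eq_ediv_of_pos (by norm_num)
    have hM0 : 0 ≤ PySem.Int.floordiv (N - 4) 2 := by
      rw [hMed]; exact Int.ediv_nonneg h4 (by norm_num)
    have h2M : 2 * PySem.Int.floordiv (N - 4) 2 ≤ N - 4 := by
      rw [hMed]; omega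
    obtain ⟨K, hflat, hstop⟩ := xrotLoop_flatten N (N.toNat + 1) 0 [[1]]
      (by simp; omega) (by simp [xpat])
    have e0 : ((0:Nat) : Int) + 1 = 1 := by norm_num
    have e1 : ((0:Nat) : Int) * (((0:Nat) : Int) + 3) = 0 := by norm_num
    rw [e0, e1] at hflat
    rw [hflat, hTM, PySem.List.slice_to _ hM0]
    by_cases hMz : PySem.Int.floordiv (N - 4) 2 ≤ 0
    · have hz0 : PySem.Int.floordiv (N - 4) 2 = 0 := le_antisymm hMz hM0
      rw [hz0]
      simp
    · rw [if_neg hMz]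
      set Mn := (PySem.Int.floordiv (N - 4) 2).toNat with hMn
      have hMn1 : 1 ≤ Mn := by omega
      have hB : xrotFill Mn Mn 1 ((List.replicate Mn 2).set 0 1) = (xpat Mn).take Mn := by
        have h0 := xrotFill_spec Mn 0 Mn ((List.replicate Mn 2).set 0 1) (by omega) ?_
        · simpa using h0
        · have hrepl : List.replicate Mn (2:Int) = 2 :: List.replicate (Mn - 1) 2 := by
            rw [← List.replicate_succ]; congr 1; omega
          rw [hrepl, List.set_cons_zero]
          have hx0 : xpat 0 = [1] := by simp [xpat]
          rw [hx0]
          have htk : List.take Mn ([1] : List Int) = [1] :=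
            List.take_of_length_le (by simp; omega)
          rw [htk]
          simp
      rw [hB]
      have hKlen : Mn ≤ (xpat K).length := by
        have hint : (Mn : Int) ≤ (K : Int) * ((K : Int) + 3) := by omega
        rw [xpat_length]
        have hc : ((K * (K + 3) : Nat) : Int) = (K : Int) * ((K : Int) + 3) := by push_cast; ring
        omega
      exact xpat_take_eq hKlen (by
        rw [xpat_length]
        have := Nat.le_mul_of_pos_right Mn (show 0 < Mn + 3 by omega)
        omega)
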